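-- pv_equiv track=rewrite | github.com/IUT-Blagnac/sae2-02-Anxton | solution_cpt.py | erase
-- ===== SOURCE A (Python) =====
-- def erase(cc):
--     stringList = []
--     cpt = 0
--     for char in cc:
--         if char != " ":
--             if cpt > 1:
--                 stringList += [" "]*cpt
--             stringList.append(char)
--             cpt = 0
--         else:
--             cpt+=1
--     if cpt > 1:
--         stringList += [" "]*cpt
--     return "".join(stringList)
-- ===== SOURCE B (Python) =====
-- def erase(cc):
--     out = []
--     i = 0
--     n = len(cc)
--     while i < n:
--         j = i + 1
--         if cc[i] == " ":
--             while j < n and cc[j] == " ":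
--                 j += 1
--             if j - i > 1:
--                 out.append(" " * (j - i))
--         else:
--             while j < n and cc[j] != " ":
--                 j += 1
--             out.append(cc[i:j])
--         i = j
--     return "".join(out)
-- ===== Notes on version B (the rewrite author's own statement) =====
-- stated objective: alternative
-- what changed: A scans char by char with a pending-space counter flushed at each non-space and at the end; B splits the string into maximal runs with a two-pointer scan, drops length-1 space runs, and appends every other run whole.
import Mathlib
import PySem

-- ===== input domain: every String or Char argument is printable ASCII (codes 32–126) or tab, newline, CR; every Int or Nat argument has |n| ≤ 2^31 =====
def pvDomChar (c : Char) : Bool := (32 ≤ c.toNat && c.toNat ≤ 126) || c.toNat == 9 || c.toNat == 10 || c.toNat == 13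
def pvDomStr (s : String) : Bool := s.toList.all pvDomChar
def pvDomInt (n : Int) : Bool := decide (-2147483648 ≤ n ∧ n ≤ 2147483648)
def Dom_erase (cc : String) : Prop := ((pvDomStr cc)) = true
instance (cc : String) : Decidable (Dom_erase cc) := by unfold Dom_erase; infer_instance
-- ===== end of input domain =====

-- ===== PORT A =====
-- A: single pass, counter cpt of pending spaces, flushed (if > 1) at each non-space and at the end.
def eraseStep (st : List Char × Nat) (char : Char) : List Char × Nat :=
  if char ≠ ' ' then
    ((if st.2 > 1 then st.1 ++ List.replicate st.2 ' ' else st.1) ++ [char], 0)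
  else
    (st.1, st.2 + 1)

def erase (cc : String) : String :=
  let r := cc.toList.foldl eraseStep ([], 0)
  String.mk (if r.2 > 1 then r.1 ++ List.replicate r.2 ' ' else r.1)

-- ===== PORT B =====
-- B: two-pointer run scan; the inner while loops are the takeWhile/dropWhile of the tail,
-- a length-1 space run is dropped, any other run is appended whole.
def eraseAltGo : List Char → List Char
  | [] => []
  | c :: cs =>
    if c = ' ' then
      let run := ' ' :: cs.takeWhile (· == ' ')
      (if run.length > 1 then run else []) ++ eraseAltGo (cs.dropWhile (· == ' '))
    else
      c :: cs.takeWhile (· != ' ') ++ eraseAltGo (cs.dropWhile (· != ' '))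
termination_by l => l.length
decreasing_by
  · exact Nat.lt_succ_of_le (List.length_dropWhile_le _ _)
  · exact Nat.lt_succ_of_le (List.length_dropWhile_le _ _)

def erase_alt (cc : String) : String := String.mk (eraseAltGo cc.toList)

-- ===== PRECONDITION & SPEC =====
def Spec_erase (cc : String) (out : String) : Prop := out = erase_alt cc
instance (cc : String) (out : String) : Decidable (Spec_erase cc out) := by unfold Spec_erase; infer_instance

-- ===== CLAIM (what is proved, stated in full; the proofs are below) =====
def Claim_equal_erase : Prop := ∀ (cc : String), Dom_erase cc → Spec_erase cc (erase cc)

-- ===== LEMMAS AND PROOFS =====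

theorem eraseAltGo_nonspace (c : Char) (cs : List Char) (h : c ≠ ' ') :
    eraseAltGo (c :: cs) = c :: eraseAltGo cs := by
  rw [eraseAltGo]
  simp only [if_neg h]
  cases cs with
  | nil => simp [eraseAltGo]
  | cons d ds =>
    by_cases hd : d = ' '
    · subst hd
      simp [List.takeWhile, List.dropWhile]
    · conv_rhs => rw [eraseAltGo]
      simp [hd]

theorem eraseAltGo_replicate (k : Nat) :
    eraseAltGo (List.replicate k ' ') =
      if k > 1 then List.replicate k ' ' else [] := by
  cases k with
  | zero => simp [eraseAltGo]
  | succ n =>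
    rw [List.replicate_succ, eraseAltGo]
    simp [eraseAltGo]

theorem eraseAltGo_replicate_cons (k : Nat) (c : Char) (cs : List Char) (hk : 0 < k) (hc : c ≠ ' ') :
    eraseAltGo (List.replicate k ' ' ++ c :: cs) =
      (if k > 1 then List.replicate k ' ' else []) ++ c :: eraseAltGo cs := by
  obtain ⟨n, rfl⟩ : ∃ n, k = n + 1 := ⟨k - 1, by omega⟩
  have hcb : (c == ' ') = false := beq_eq_false_iff_ne.mpr hc
  rw [List.replicate_succ, List.cons_append, eraseAltGo]
  have ht : (List.replicate n ' ' ++ c :: cs).takeWhile (· == ' ') = List.replicate n ' ' := by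
    rw [List.takeWhile_append]
    simp [List.takeWhile, hcb]
  have hd : (List.replicate n ' ' ++ c :: cs).dropWhile (· == ' ') = c :: cs := by
    rw [List.dropWhile_append]
    simp [List.dropWhile, hcb]
  rw [if_pos rfl, ht, hd, eraseAltGo_nonspace c cs hc]
  simp [List.replicate_succ]

-- main invariant: running A's loop from pending count k behaves like B on (replicate k ' ' ++ l)
theorem erase_invariant (l : List Char) :
    ∀ (acc : List Char) (k : Nat),
      (let r := l.foldl eraseStep (acc, k)
       if r.2 > 1 then r.1 ++ List.replicate r.2 ' ' else r.1) =
      acc ++ eraseAltGo (List.replicate k ' ' ++ l) := by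
  induction l with
  | nil =>
    intro acc k
    simp only [List.foldl_nil, List.append_nil, eraseAltGo_replicate]
    split <;> simp
  | cons c cs ih =>
    intro acc k
    by_cases hc : c = ' '
    · subst hc
      rw [List.foldl_cons]
      have h1 : eraseStep (acc, k) ' ' = (acc, k + 1) := by simp [eraseStep]
      rw [h1]
      have := ih acc (k + 1)
      rw [List.replicate_succ', List.append_assoc, List.singleton_append] at this
      exact this
    · simp only [List.foldl_cons, eraseStep, if_pos hc]
      have := ih ((if k > 1 then acc ++ List.replicate k ' ' else acc) ++ [c]) 0
      rw [this]
      simp only [List.replicate_zero, List.nil_append]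
      cases Nat.eq_zero_or_pos k with
      | inl h0 =>
        subst h0
        rw [List.replicate_zero, List.nil_append, eraseAltGo_nonspace c cs hc]
        simp
      | inr hpos =>
        rw [eraseAltGo_replicate_cons k c cs hpos hc]
        split <;> simp

-- ===== VERDICT (by name: the statement is the Claim_ definition above) =====
theorem erase_spec : Claim_equal_erase := by
  intro cc _
  unfold Spec_erase erase erase_alt
  have := erase_invariant cc.toList [] 0
  simp only [List.replicate_zero, List.nil_append] at this
  exact congrArg String.mk (by simpa using this)
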